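-- pv_equiv track=rewrite | github.com/atilas88/rag_acore_mod_playerbots | src/preprocessing/chunker.py | _chunk_config
-- ===== SOURCE A (Python) =====
-- from typing import List, Dict
--
-- def _chunk_config(content: str) -> List[str]:
--     """Chunks configuration files"""
--     chunks = []
--     current_section = None
--     current_settings = []
--
--     for line in content.split('\n'):
--         if line.strip().startswith('[') and line.strip().endswith(']'):
--             if current_section and current_settings:
--                 chunk = f"{current_section}\n" + '\n'.join(current_settings)
--                 chunks.append(chunk)
--
--             current_section = line.strip()
--             current_settings = []
--
--         elif line.strip() and not line.strip().startswith('#'):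
--             current_settings.append(line)
--
--             if '=' in line and 'AiPlayerbot' in line:
--                 individual_chunk = f"{current_section}\n{line}"
--                 chunks.append(individual_chunk)
--
--     if current_section and current_settings:
--         chunk = f"{current_section}\n" + '\n'.join(current_settings)
--         chunks.append(chunk)
--
--     return chunks
-- ===== SOURCE B (Python) =====
-- from typing import List
--
-- def _chunk_config(content: str) -> List[str]:
--     """Chunks configuration files (two-phase: parse into groups, then emit)."""
--     # Phase 1: group the raw setting lines under their section header.
--     groups = []
--     header = None
--     settings = []
--     for line in content.split('\n'):
--         s = line.strip()
--         if s.startswith('[') and s.endswith(']'):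
--             groups.append((header, settings))
--             header = s
--             settings = []
--         elif s and not s.startswith('#'):
--             settings.append(line)
--     groups.append((header, settings))
--
--     # Phase 2: emit per group the individual AiPlayerbot chunks, then the full-section chunk.
--     chunks = []
--     for h, lines in groups:
--         for line in lines:
--             if '=' in line and 'AiPlayerbot' in line:
--                 chunks.append(f"{h}\n{line}")
--         if h and lines:
--             chunks.append(f"{h}\n" + '\n'.join(lines))
--     return chunks
-- ===== Notes on version B (the rewrite author's own statement) =====
-- stated objective: alternative
-- what changed: Splits A's single interleaved loop (emission fused with parsing, with the full-section chunk deferred to the next header) into two separately-shaped passes: one pass parses the file into (header, setting-lines) groups, a second pass emits the individual AiPlayerbot chunks and then the full-section chunk per group.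
import Mathlib
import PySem

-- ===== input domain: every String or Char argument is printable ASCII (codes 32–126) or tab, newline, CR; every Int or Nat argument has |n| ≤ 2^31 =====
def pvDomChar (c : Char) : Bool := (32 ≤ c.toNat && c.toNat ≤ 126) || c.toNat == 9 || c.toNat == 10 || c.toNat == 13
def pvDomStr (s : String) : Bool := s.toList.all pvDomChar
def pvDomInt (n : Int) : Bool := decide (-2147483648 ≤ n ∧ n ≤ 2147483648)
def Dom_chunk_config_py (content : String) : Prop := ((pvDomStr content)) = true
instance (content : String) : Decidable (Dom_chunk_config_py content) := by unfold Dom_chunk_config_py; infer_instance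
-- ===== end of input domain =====

-- B separates A's single interleaved parse-and-emit loop into two passes (parse into
-- (header, lines) groups, then emit per group); same output, same O(n) cost.


-- ===== PORT A =====
-- f"{current_section}\n{line}" renders None as "None"
def pvFmtA (h : Option String) (line : String) : String :=
  (match h with | none => "None" | some s => s) ++ "\n" ++ line

-- Python truthiness of `current_section and current_settings`
def pvTruthyA (h : Option String) (st : List String) : Bool :=
  (match h with | none => false | some s => !(s == "")) && !(st.isEmpty)

def pvStepA (acc : List String × Option String × List String) (line : String) :
    List String × Option String × List String :=
  let (chunks, cur, st) := acc
  let s := PySem.Str.strip line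
  if PySem.Str.startswith s "[" && PySem.Str.endswith s "]" then
    (if pvTruthyA cur st then
        chunks ++ [(match cur with | none => "None" | some h => h) ++ "\n" ++ PySem.Str.join "\n" st]
      else chunks,
     some s, [])
  else if !(s == "") && !(PySem.Str.startswith s "#") then
    let st' := st ++ [line]
    (if PySem.Str.isIn "=" line && PySem.Str.isIn "AiPlayerbot" line then
        chunks ++ [pvFmtA cur line]
      else chunks,
     cur, st')
  else (chunks, cur, st)

def chunk_config_py (content : String) : List String :=
  let lines := (PySem.Str.split? content "\n").getD []
  let (chunks, cur, st) := lines.foldl pvStepA ([], none, [])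
  if pvTruthyA cur st then
    chunks ++ [(match cur with | none => "None" | some h => h) ++ "\n" ++ PySem.Str.join "\n" st]
  else chunks

-- ===== PORT B =====
def pvFmtB (h : Option String) (line : String) : String :=
  (match h with | none => "None" | some s => s) ++ "\n" ++ line

def pvTruthyB (h : Option String) (st : List String) : Bool :=
  (match h with | none => false | some s => !(s == "")) && !(st.isEmpty)

-- phase 1 step: start a new group at a header line; collect non-empty, non-comment lines
def pvStepB (acc : List (Option String × List String) × Option String × List String)
    (line : String) : List (Option String × List String) × Option String × List String :=
  let (groups, header, st) := acc
  let s := PySem.Str.strip line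
  if PySem.Str.startswith s "[" && PySem.Str.endswith s "]" then
    (groups ++ [(header, st)], some s, [])
  else if !(s == "") && !(PySem.Str.startswith s "#") then
    (groups, header, st ++ [line])
  else (groups, header, st)

-- phase 2: individual AiPlayerbot chunks first, then the full-section chunk
def pvEmitB (acc : List String) (g : Option String × List String) : List String :=
  let (h, ls) := g
  let acc := ls.foldl (fun a line =>
    if PySem.Str.isIn "=" line && PySem.Str.isIn "AiPlayerbot" line then a ++ [pvFmtB h line]
    else a) acc
  if pvTruthyB h ls then
    acc ++ [(match h with | none => "None" | some s => s) ++ "\n" ++ PySem.Str.join "\n" ls]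
  else acc

def chunk_config_py_alt (content : String) : List String :=
  let lines := (PySem.Str.split? content "\n").getD []
  let (groups, header, st) := lines.foldl pvStepB ([], none, [])
  (groups ++ [(header, st)]).foldl pvEmitB []

-- ===== PRECONDITION & SPEC =====
def Spec_chunk_config_py (content : String) (out : List String) : Prop := out = chunk_config_py_alt content
instance (content : String) (out : List String) : Decidable (Spec_chunk_config_py content out) := by unfold Spec_chunk_config_py; infer_instance

-- ===== CLAIM (what is proved, stated in full; the proofs are below) =====
def Claim_equal_chunk_config_py : Prop := ∀ (content : String), Dom_chunk_config_py content → Spec_chunk_config_py content (chunk_config_py content)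

-- ===== LEMMAS AND PROOFS =====

-- recursive description of B's phase 1 (the groups produced from an open (h, st) group)
def pvP (ls : List String) (h : Option String) (st : List String) :
    List (Option String × List String) :=
  match ls with
  | [] => [(h, st)]
  | l :: ls =>
    let s := PySem.Str.strip l
    if PySem.Str.startswith s "[" && PySem.Str.endswith s "]" then
      (h, st) :: pvP ls (some s) []
    else if !(s == "") && !(PySem.Str.startswith s "#") then
      pvP ls h (st ++ [l])
    else pvP ls h st

def pvCond (line : String) : Bool :=
  PySem.Str.isIn "=" line && PySem.Str.isIn "AiPlayerbot" line

def pvFull (h : Option String) (st : List String) : List String :=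
  if pvTruthyB h st then
    [(match h with | none => "None" | some s => s) ++ "\n" ++ PySem.Str.join "\n" st]
  else []

-- the chunks one group contributes
def pvE (g : Option String × List String) : List String :=
  (g.2.filter pvCond).map (pvFmtB g.1) ++ pvFull g.1 g.2

-- recursive description of A's remaining output from state (h, st)
def pvASpec (ls : List String) (h : Option String) (st : List String) : List String :=
  match ls with
  | [] => pvFull h st
  | l :: ls =>
    let s := PySem.Str.strip l
    if PySem.Str.startswith s "[" && PySem.Str.endswith s "]" then
      pvFull h st ++ pvASpec ls (some s) []
    else if !(s == "") && !(PySem.Str.startswith s "#") then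
      (if pvCond l then [pvFmtB h l] else []) ++ pvASpec ls h (st ++ [l])
    else pvASpec ls h st

lemma pvTruthyAB (h : Option String) (st : List String) : pvTruthyA h st = pvTruthyB h st := rfl

-- A's final flush, projection form
def pvFinishA (t : List String × Option String × List String) : List String :=
  if pvTruthyA t.2.1 t.2.2 then
    t.1 ++ [(match t.2.1 with | none => "None" | some h => h) ++ "\n" ++ PySem.Str.join "\n" t.2.2]
  else t.1

lemma pvA_run (ls : List String) (ch : List String) (h : Option String) (st : List String) :
    pvFinishA (ls.foldl pvStepA (ch, h, st)) = ch ++ pvASpec ls h st := by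
  induction ls generalizing ch h st with
  | nil =>
    simp only [List.foldl, pvASpec, pvFinishA, pvFull, pvTruthyAB]
    split <;> simp
  | cons l ls ih =>
    simp only [List.foldl, pvStepA, pvASpec]
    split
    · rw [ih, ← List.append_assoc]
      congr 1
      simp only [pvFull, pvTruthyAB]
      split <;> simp
    · split
      · rw [ih, ← List.append_assoc]
        congr 1
        show (if pvCond l then ch ++ [pvFmtB h l] else ch) = _
        split <;> simp
      · exact ih ch h st

lemma pvB_groups (ls : List String) (g : List (Option String × List String))
    (h : Option String) (st : List String) :
    (ls.foldl pvStepB (g, h, st)).1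
      ++ [((ls.foldl pvStepB (g, h, st)).2.1, (ls.foldl pvStepB (g, h, st)).2.2)]
      = g ++ pvP ls h st := by
  induction ls generalizing g h st with
  | nil => simp [pvP]
  | cons l ls ih =>
    simp only [List.foldl, pvStepB, pvP]
    split
    · rw [ih, List.append_assoc]
      rfl
    · split
      · exact ih g h (st ++ [l])
      · exact ih g h st

lemma pvEmit_inner (ls : List String) (a : List String) (h : Option String) :
    ls.foldl (fun a line => if pvCond line then a ++ [pvFmtB h line] else a) a
      = a ++ (ls.filter pvCond).map (pvFmtB h) := by
  induction ls generalizing a with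
  | nil => simp
  | cons l ls ih =>
    simp only [List.foldl, List.filter_cons]
    by_cases hc : pvCond l = true
    · rw [if_pos hc, if_pos hc, ih, List.map_cons, List.append_assoc]
      rfl
    · rw [if_neg hc, if_neg hc, ih]

lemma pvEmitB_eq (a : List String) (g : Option String × List String) :
    pvEmitB a g = a ++ pvE g := by
  obtain ⟨h, ls⟩ := g
  show (let acc := ls.foldl (fun a line => if pvCond line then a ++ [pvFmtB h line] else a) a;
        if pvTruthyB h ls then
          acc ++ [(match h with | none => "None" | some s => s) ++ "\n" ++ PySem.Str.join "\n" ls]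
        else acc) = a ++ pvE (h, ls)
  simp only [pvEmit_inner, pvE, pvFull]
  split <;> simp

lemma pvEmit_fold (gs : List (Option String × List String)) (a : List String) :
    gs.foldl pvEmitB a = a ++ gs.flatMap pvE := by
  induction gs generalizing a with
  | nil => simp
  | cons g gs ih => simp [List.foldl, pvEmitB_eq, ih]

lemma pvASpec_eq_flatMap (ls : List String) (h : Option String) (st : List String) :
    (st.filter pvCond).map (pvFmtB h) ++ pvASpec ls h st = (pvP ls h st).flatMap pvE := by
  induction ls generalizing h st with
  | nil => simp [pvASpec, pvP, pvE]
  | cons l ls ih =>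
    simp only [pvASpec, pvP]
    split
    · have hrec := ih (some (PySem.Str.strip l)) []
      simp only [List.filter_nil, List.map_nil, List.nil_append] at hrec
      simp [List.flatMap_cons, pvE, hrec, List.append_assoc]
    · split
      · rw [← ih h (st ++ [l])]
        by_cases hc : pvCond l = true
        · simp [List.filter_append, hc, List.append_assoc]
        · simp [List.filter_append, hc]
      · exact ih h st

-- ===== VERDICT (by name: the statement is the Claim_ definition above) =====
theorem chunk_config_py_spec : Claim_equal_chunk_config_py := by
  intro content _
  unfold Spec_chunk_config_py chunk_config_py chunk_config_py_alt
  have hA := pvA_run ((PySem.Str.split? content "\n").getD []) [] none []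
  have hB := pvB_groups ((PySem.Str.split? content "\n").getD []) [] none []
  simp only [pvFinishA, List.nil_append] at hA hB
  simp only [hA, hB, pvEmit_fold, List.nil_append]
  have hmain := pvASpec_eq_flatMap ((PySem.Str.split? content "\n").getD []) none []
  simp only [List.filter_nil, List.map_nil, List.nil_append] at hmain
  exact hmain
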